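-- pv_equiv track=rewrite | github.com/ShakedTadessa/Genomic-Motif-Analyzer | finalproject.py | to_order_preserving
-- ===== SOURCE A (Python) =====
-- def to_order_preserving(s):
--     mapping = {}
--     next_id = 0
--     out = []
--     for ch in s:
--         if ch not in mapping:
--             mapping[ch] = str(next_id)
--             next_id += 1
--         out.append(mapping[ch])
--     return "".join(out)
-- ===== SOURCE B (Python) =====
-- def to_order_preserving(s):
--     # id of a character = number of distinct characters occurring strictly
--     # before its first occurrence; no mapping table is ever built.
--     chars = list(s)
--     return "".join(str(len(set(chars[:chars.index(ch)]))) for ch in chars)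
-- ===== Notes on version B (the rewrite author's own statement) =====
-- stated objective: alternative
-- what changed: B builds no mapping table at all: it computes each character's id directly as the number of distinct characters before that character's first occurrence (len(set(prefix up to first index))), trading A's incremental dict for a per-character closed-form count.
import Mathlib
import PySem

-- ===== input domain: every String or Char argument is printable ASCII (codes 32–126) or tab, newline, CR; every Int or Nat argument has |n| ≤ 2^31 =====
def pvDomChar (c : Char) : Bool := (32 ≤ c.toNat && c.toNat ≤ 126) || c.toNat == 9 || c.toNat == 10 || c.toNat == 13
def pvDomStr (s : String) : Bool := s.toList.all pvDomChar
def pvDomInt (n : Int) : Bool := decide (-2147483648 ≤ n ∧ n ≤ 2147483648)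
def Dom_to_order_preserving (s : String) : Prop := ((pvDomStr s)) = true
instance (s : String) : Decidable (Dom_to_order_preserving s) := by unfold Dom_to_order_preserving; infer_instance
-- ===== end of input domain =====

-- B builds no mapping table: each character's id is computed directly as the number of
-- distinct characters before its first occurrence (alternative algorithm, not faster).

-- ===== PORT A =====
-- the for-loop over s with state (mapping, next_id, out)
def pvLoopA : List Char → PySem.Dict Char String → Int → List String → List String
  | [], _, _, out => out
  | c :: rest, m, nid, out =>
    match m.get? c with
    | some v => pvLoopA rest m nid (out ++ [v])
    | none => pvLoopA rest (m.insert c (PySem.Int.toStr nid)) (nid + 1) (out ++ [PySem.Int.toStr nid])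

def to_order_preserving (s : String) : String :=
  PySem.Str.join "" (pvLoopA s.toList PySem.Dict.empty 0 [])

-- ===== PORT B =====
-- str(len(set(chars[:chars.index(ch)]))); chars.index(ch) always succeeds since ch ∈ chars,
-- so the Option's default 0 is never used; chars[:i] with i : Nat is take i.
def to_order_preserving_alt (s : String) : String :=
  let chars := s.toList
  PySem.Str.join ""
    (chars.map (fun c =>
      PySem.Int.toStr
        (((PySem.Set.ofList (chars.take ((PySem.List.index? chars c).getD 0))).length : Int))))

-- ===== PRECONDITION & SPEC =====
def Spec_to_order_preserving (s : String) (out : String) : Prop := out = to_order_preserving_alt s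
instance (s : String) (out : String) : Decidable (Spec_to_order_preserving s out) := by unfold Spec_to_order_preserving; infer_instance

-- ===== CLAIM (what is proved, stated in full; the proofs are below) =====
def Claim_equal_to_order_preserving : Prop := ∀ (s : String), Dom_to_order_preserving s → Spec_to_order_preserving s (to_order_preserving s)

-- ===== LEMMAS AND PROOFS =====

-- the dict A has built after processing a prefix whose ordered distinct chars are u
def pvMkDict (u : List Char) : PySem.Dict Char String :=
  u.zipIdx.foldl (fun d p => d.insert p.1 (PySem.Int.toStr (p.2 : Int))) PySem.Dict.empty

lemma pvMkDict_append (w : List Char) (d : Char) :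
    pvMkDict (w ++ [d]) = (pvMkDict w).insert d (PySem.Int.toStr (w.length : Int)) := by
  simp [pvMkDict, List.zipIdx_append, List.foldl_append]

lemma pvMkDict_get? (u : List Char) (hu : u.Nodup) (c : Char) :
    (pvMkDict u).get? c =
      if c ∈ u then some (PySem.Int.toStr (u.idxOf c : Int)) else none := by
  induction u using List.reverseRecOn with
  | nil => simp [pvMkDict, PySem.Dict.get?_empty]
  | append_singleton w d ih =>
    obtain ⟨hw, hdj⟩ := List.nodup_append.mp hu
    have hdw : d ∉ w := by
      intro h; exact hdj.2 d h d (List.mem_singleton_self d) rfl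
    rw [pvMkDict_append, PySem.Dict.get?_insert, ih hw]
    by_cases hc : c = d
    · subst hc
      simp [hdw, List.idxOf_append_of_notMem hdw]
    · by_cases hcw : c ∈ w
      · simp [hc, hcw, List.idxOf_append_of_mem hcw]
      · simp [hc, hcw]

lemma pvLoopA_inv (cs : List Char) : ∀ (u : List Char) (out : List String), u.Nodup →
    pvLoopA cs (pvMkDict u) (u.length : Int) out
      = out ++ cs.map (fun c => (pvMkDict (PySem.Set.update u cs)).getD c "") := by
  induction cs with
  | nil => intro u out _; simp [pvLoopA, PySem.Set.update_nil]
  | cons c rest ih =>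
    intro u out hu
    by_cases hc : c ∈ u
    · have hupd : PySem.Set.update u (c :: rest) = PySem.Set.update u rest := by
        rw [PySem.Set.update_cons, PySem.Set.add_of_mem hc]
      have hget : (pvMkDict u).get? c = some (PySem.Int.toStr (u.idxOf c : Int)) := by
        rw [pvMkDict_get? u hu]; simp [hc]
      have hval : (pvMkDict (PySem.Set.update u rest)).getD c "" =
          PySem.Int.toStr (u.idxOf c : Int) := by
        have hnr : (PySem.Set.update u rest).Nodup := PySem.Set.nodup_update u rest hu
        rw [PySem.Dict.getD_eq_get?_getD, pvMkDict_get? _ hnr]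
        have hm : c ∈ PySem.Set.update u rest := (PySem.Set.mem_update u rest c).mpr (Or.inl hc)
        rw [PySem.Set.update_eq_append_filter, List.idxOf_append_of_mem hc] at *
        simp [hc]
      simp only [pvLoopA, hget]
      rw [ih u _ hu, hupd, List.map_cons, hval]
      simp
    · have hupd : PySem.Set.update u (c :: rest) = PySem.Set.update (u ++ [c]) rest := by
        rw [PySem.Set.update_cons, PySem.Set.add_of_not_mem hc]
      have hget : (pvMkDict u).get? c = none := by
        rw [pvMkDict_get? u hu]; simp [hc]
      have hnu : (u ++ [c]).Nodup := by
        simp [List.nodup_append, hu]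
        intro a ha hb; subst hb; exact hc ha
      have hval : (pvMkDict (PySem.Set.update (u ++ [c]) rest)).getD c "" =
          PySem.Int.toStr (u.length : Int) := by
        have hnr : (PySem.Set.update (u ++ [c]) rest).Nodup :=
          PySem.Set.nodup_update _ rest hnu
        rw [PySem.Dict.getD_eq_get?_getD, pvMkDict_get? _ hnr]
        have hmc : c ∈ u ++ [c] := by simp
        have hm : c ∈ PySem.Set.update (u ++ [c]) rest :=
          (PySem.Set.mem_update _ rest c).mpr (Or.inl hmc)
        rw [PySem.Set.update_eq_append_filter, List.idxOf_append_of_mem hmc,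
          List.idxOf_append_of_notMem hc] at *
        simp
      simp only [pvLoopA, hget]
      rw [← pvMkDict_append]
      have hlen : (u.length : Int) + 1 = ((u ++ [c]).length : Int) := by
        simp
      rw [hlen, ih (u ++ [c]) _ hnu, hupd, List.map_cons, hval]
      simp

-- the two per-character formulas coincide: the rank of c among the ordered distinct
-- characters equals the number of distinct characters in the prefix before c's first index
lemma rank_eq_prefix_card (l : List Char) (c : Char) (hc : c ∈ l) :
    (PySem.Set.ofList l).idxOf c
      = (PySem.Set.ofList (l.take ((PySem.List.index? l c).getD 0))).length := by
  obtain ⟨k, hk⟩ := (PySem.List.index?_isSome_iff (xs := l) (v := c)).mpr hc |> Option.isSome_iff_exists.mp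
  obtain ⟨pre, suf, hl, hlen, hpre⟩ := (PySem.List.index?_eq_some_iff _ _ _).mp hk
  have htake : l.take k = pre := by
    subst hl hlen
    simp
  rw [hk]
  simp only [Option.getD_some, htake]
  subst hl
  have hcp : c ∉ PySem.Set.ofList pre := by
    intro h; exact hpre ((PySem.Set.mem_ofList _ _).mp h)
  have : PySem.Set.ofList (pre ++ c :: suf)
      = (PySem.Set.ofList pre ++ [c]) ++ ((PySem.Set.ofList suf).filter
          (fun y => !(PySem.Set.contains (PySem.Set.ofList pre ++ [c]) y))) := by
    rw [PySem.Set.ofList_append, PySem.Set.update_cons, PySem.Set.add_of_not_mem hcp,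
      PySem.Set.update_eq_append_filter]
  rw [this, List.append_assoc, List.idxOf_append_of_notMem hcp]
  simp

lemma getD_eq_formula (l : List Char) (c : Char) (hc : c ∈ l) :
    (pvMkDict (PySem.Set.ofList l)).getD c ""
      = PySem.Int.toStr
          (((PySem.Set.ofList (l.take ((PySem.List.index? l c).getD 0))).length : Int)) := by
  rw [PySem.Dict.getD_eq_get?_getD,
    pvMkDict_get? _ (PySem.Set.nodup_ofList l)]
  have hm : c ∈ PySem.Set.ofList l := (PySem.Set.mem_ofList _ _).mpr hc
  rw [if_pos hm, Option.getD_some, rank_eq_prefix_card l c hc]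

-- ===== VERDICT (by name: the statement is the Claim_ definition above) =====
theorem to_order_preserving_spec : Claim_equal_to_order_preserving := by
  intro s _
  unfold Spec_to_order_preserving to_order_preserving to_order_preserving_alt
  have h := pvLoopA_inv s.toList [] [] List.nodup_nil
  rw [PySem.Set.update_nil_left] at h
  simp only [List.length_nil, Nat.cast_zero, List.nil_append] at h
  have hdict : pvMkDict [] = PySem.Dict.empty := rfl
  rw [hdict] at h
  rw [h]
  congr 1
  exact List.map_congr_left (fun c hc => getD_eq_formula s.toList c hc)
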